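-- pv_equiv track=rewrite | github.com/YossiGcode/SR-11-7-valuation-model | modules/ai_auditor.py | _resolve_tolerance_key
-- ===== SOURCE A (Python) =====
-- from typing import Any, Optional
--
-- def _resolve_tolerance_key(source_key: str, tolerances: dict) -> Optional[str]:
--     """
--     Find the best matching tolerance key for a given source_key.
--
--     Strategy: try progressively shorter left-anchored underscore-joined prefixes,
--     longest first.  This correctly matches both simple and compound metric names.
--
--     Examples
--     --------
--     "revenue_2024"     → tries "revenue_2024" (miss) → "revenue"      (hit)
--     "discount_rate_q3" → tries "discount_rate_q3" (miss) → "discount_rate" (hit)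
--     "unknown_metric"   → no match → None
--
--     Parameters
--     ----------
--     source_key : str
--         The claim's source_key field.
--     tolerances : dict
--         The tolerances sub-dict from the ai_audit domain config.
--
--     Returns
--     -------
--     str or None
--         The matching tolerance key, or None if no policy is defined.
--     """
--     if source_key in tolerances:
--         return source_key
--     parts = source_key.split("_")
--     for end in range(len(parts) - 1, 0, -1):
--         candidate = "_".join(parts[:end])
--         if candidate in tolerances:
--             return candidate
--     return None
-- ===== SOURCE B (Python) =====
-- from typing import Any, Optional
--
-- def _resolve_tolerance_key(source_key: str, tolerances: dict) -> Optional[str]: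
--     """Scan the tolerance keys once, keeping the longest key that is a whole
--     underscore-segment prefix of source_key (or equal to it)."""
--     best = None
--     for key in tolerances:
--         if key == source_key or source_key.startswith(key + "_"):
--             if best is None or len(key) > len(best):
--                 best = key
--     return best
-- ===== Notes on version B (the rewrite author's own statement) =====
-- stated objective: alternative
-- what changed: Instead of generating progressively shorter underscore-joined prefixes of source_key and looking each one up in the dict, B makes a single pass over the tolerance keys, keeping the longest key k with source_key == k or source_key.startswith(k + '_').
import Mathlib
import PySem

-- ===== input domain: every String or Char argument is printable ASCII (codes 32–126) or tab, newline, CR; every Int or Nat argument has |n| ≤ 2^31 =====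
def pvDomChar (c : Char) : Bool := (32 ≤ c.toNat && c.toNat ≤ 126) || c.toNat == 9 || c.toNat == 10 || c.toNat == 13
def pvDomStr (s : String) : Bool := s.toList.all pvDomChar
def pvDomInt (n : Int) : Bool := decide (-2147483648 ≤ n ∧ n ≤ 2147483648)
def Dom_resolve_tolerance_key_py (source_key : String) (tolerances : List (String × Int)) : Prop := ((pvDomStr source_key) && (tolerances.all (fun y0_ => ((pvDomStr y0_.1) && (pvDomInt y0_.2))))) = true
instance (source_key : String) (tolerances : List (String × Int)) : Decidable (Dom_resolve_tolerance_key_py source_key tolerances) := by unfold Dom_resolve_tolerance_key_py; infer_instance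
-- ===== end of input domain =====

-- B replaces A's generate-candidate-prefixes-and-look-them-up strategy by a single scan of the
-- tolerance keys, keeping the longest key that is a whole underscore-segment prefix of
-- source_key (alternative decomposition, similar cost).

-- ===== PORT A =====
-- the `for end in range(len(parts) - 1, 0, -1)` loop with its early return
def pvLoopA (tolerances : List (String × Int)) (parts : List String) : List Int → Option String
  | [] => none
  | e :: es =>
    let candidate := PySem.Str.join "_" (PySem.List.slice parts none (some e))
    if tolerances.any (fun p => p.1 == candidate) then some candidate
    else pvLoopA tolerances parts es

def resolve_tolerance_key_py (source_key : String) (tolerances : List (String × Int)) : Option String :=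
  if tolerances.any (fun p => p.1 == source_key) then some source_key
  else
    match PySem.Str.split? source_key "_" with
    | none => none   -- unreachable: the separator "_" is non-empty
    | some parts => pvLoopA tolerances parts (PySem.List.pyRange ((parts.length : Int) - 1) 0 (-1))

-- ===== PORT B =====
def resolve_tolerance_key_py_alt (source_key : String) (tolerances : List (String × Int)) : Option String :=
  tolerances.foldl (fun best p =>
    if p.1 == source_key || PySem.Str.startswith source_key (p.1 ++ "_") then
      match best with
      | none => some p.1
      | some b => if PySem.Str.len b < PySem.Str.len p.1 then some p.1 else some b
    else best) none

-- ===== PRECONDITION & SPEC =====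
def Spec_resolve_tolerance_key_py (source_key : String) (tolerances : List (String × Int)) (out : Option String) : Prop := out = resolve_tolerance_key_py_alt source_key tolerances
instance (source_key : String) (tolerances : List (String × Int)) (out : Option String) : Decidable (Spec_resolve_tolerance_key_py source_key tolerances out) := by unfold Spec_resolve_tolerance_key_py; infer_instance

-- ===== CLAIM (what is proved, stated in full; the proofs are below) =====
def Claim_equal_resolve_tolerance_key_py : Prop := ∀ (source_key : String) (tolerances : List (String × Int)), Dom_resolve_tolerance_key_py source_key tolerances → Spec_resolve_tolerance_key_py source_key tolerances (resolve_tolerance_key_py source_key tolerances)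

-- ===== LEMMAS AND PROOFS =====

-- join with a single "_" separator, at the character level
def pvJ (ls : List (List Char)) : List Char := PySem.Chars.join ['_'] ls

-- B's match test: k names the whole source_key or a whole underscore-segment prefix of it
def pvG (s k : String) : Bool := k == s || PySem.Str.startswith s (k ++ "_")

-- A's dict-membership test
def pvKey (tolerances : List (String × Int)) (c : String) : Bool := tolerances.any (fun p => p.1 == c)


lemma pvGoSpec : ∀ (fuel : Nat) (l cur : List Char) (accs : List (List Char)), l.length ≤ fuel →
    PySem.Chars.splitOn.go ['_'] fuel l cur accs = accs.reverse ++ (List.splitOn '_' l).modifyHead (cur.reverse ++ ·) := by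
  intro fuel
  induction fuel with
  | zero =>
    intro l cur accs h
    have : l = [] := List.eq_nil_of_length_eq_zero (Nat.le_zero.mp h)
    subst this
    simp [PySem.Chars.splitOn.go, List.splitOn, List.splitOnP_nil]
  | succ fuel ih =>
    intro l cur accs h
    cases l with
    | nil => simp [PySem.Chars.splitOn.go, List.splitOn, List.splitOnP_nil]
    | cons c rest =>
      by_cases hc : c = '_'
      · subst hc
        have hpre : List.isPrefixOf ['_'] ('_' :: rest) = true := by simp [List.isPrefixOf]
        rw [show PySem.Chars.splitOn.go ['_'] (fuel+1) ('_' :: rest) cur accs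
            = PySem.Chars.splitOn.go ['_'] fuel (List.drop (['_'] : List Char).length ('_' :: rest)) [] (cur.reverse :: accs) by
          simp [PySem.Chars.splitOn.go, hpre]]
        simp only [List.length_singleton, List.drop_succ_cons, List.drop_zero]
        rw [ih rest [] (cur.reverse :: accs) (by simpa using h)]
        simp [List.splitOn, List.splitOnP_cons]
        obtain ⟨p, ps, hps⟩ := List.exists_cons_of_ne_nil (List.splitOnP_ne_nil (· == '_') rest)
        simp [hps]
      · have hpre : List.isPrefixOf ['_'] (c :: rest) = false := by
          simp [List.isPrefixOf]; exact fun hh => (hc hh.symm).elim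
        rw [show PySem.Chars.splitOn.go ['_'] (fuel+1) (c :: rest) cur accs
            = PySem.Chars.splitOn.go ['_'] fuel rest (c :: cur) accs by
          simp [PySem.Chars.splitOn.go, hpre]]
        rw [ih rest (c :: cur) accs (by simpa using h)]
        have hcb : (c == '_') = false := by simpa using hc
        simp [List.splitOn, List.splitOnP_cons, hcb]
        obtain ⟨p, ps, hps⟩ := List.exists_cons_of_ne_nil (List.splitOnP_ne_nil (· == '_') rest)
        simp [hps]

lemma pvSplitOn_eq (cs : List Char) : PySem.Chars.splitOn cs ['_'] = List.splitOn '_' cs := by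
  rw [show PySem.Chars.splitOn cs ['_'] = PySem.Chars.splitOn.go ['_'] (cs.length + 1) cs [] [] from rfl]
  rw [pvGoSpec (cs.length + 1) cs [] [] (by omega)]
  obtain ⟨p, ps, hps⟩ := List.exists_cons_of_ne_nil (List.splitOnP_ne_nil (· == '_') cs)
  simp [List.splitOn] at hps ⊢
  simp [hps]


lemma pvSplitOn_no_sep (cs : List Char) : ∀ p ∈ List.splitOn '_' cs, '_' ∉ p := by
  induction cs with
  | nil => simp [List.splitOn, List.splitOnP_nil]
  | cons c rest ih =>
    intro p hp hmem
    by_cases hc : c = '_'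
    · subst hc
      rw [List.splitOn, List.splitOnP_cons] at hp
      simp at hp
      rcases hp with rfl | hp
      · simp at hmem
      · exact ih p hp hmem
    · have hcb : (c == '_') = false := by simpa using hc
      rw [List.splitOn, List.splitOnP_cons, hcb] at hp
      simp at hp
      obtain ⟨q, qs, hqs⟩ := List.exists_cons_of_ne_nil (List.splitOnP_ne_nil (· == '_') rest)
      rw [hqs] at hp
      simp only [List.modifyHead, List.mem_cons] at hp
      rcases hp with rfl | hp
      · rcases List.mem_cons.mp hmem with h | hm
        · exact hc h.symm
        · exact ih q (by rw [List.splitOn, hqs]; simp) hm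
      · exact ih p (by rw [List.splitOn, hqs]; simp [hp]) hmem

lemma pvJ_splitOn (cs : List Char) : pvJ (List.splitOn '_' cs) = cs :=
  List.intercalate_splitOn cs '_'

lemma pvJ_take_succ (ps : List (List Char)) : ∀ (e : Nat), 1 ≤ e → ∀ (h2 : e < ps.length),
    pvJ (ps.take (e+1)) = pvJ (ps.take e) ++ '_' :: ps[e] := by
  induction ps with
  | nil => intro e h1 h2; simp at h2
  | cons p ps ih =>
    intro e h1 h2
    match e, h1 with
    | 1, _ =>
      obtain ⟨q, ps', hq⟩ := List.exists_cons_of_ne_nil (show ps ≠ [] by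
        rintro rfl; simp at h2)
      subst hq
      simp [pvJ, PySem.Chars.join_singleton, PySem.Chars.join_cons_cons]
    | (e'+2), _ =>
      have h2' : e' + 1 < ps.length := by simp at h2; omega
      obtain ⟨q, ps', hq⟩ := List.exists_cons_of_ne_nil (show ps ≠ [] by
        rintro rfl; simp at h2')
      have hrec := ih (e'+1) (by omega) h2'
      subst hq
      simp only [List.take_succ_cons] at hrec ⊢
      have hju : ∀ (l : List (List Char)), pvJ (p :: q :: l) = p ++ '_' :: pvJ (q :: l) := by
        intro l; simp [pvJ, PySem.Chars.join_cons_cons]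
      rw [hju, hju, hrec]; simp

lemma pvJ_take_prefix (ps : List (List Char)) : ∀ (e : Nat), pvJ (ps.take e) <+: pvJ ps := by
  induction ps with
  | nil => intro e; simp
  | cons p ps ih =>
    intro e
    cases e with
    | zero => simp [pvJ, PySem.Chars.join_nil]
    | succ e' =>
      rw [List.take_succ_cons]
      cases he' : ps.take e' with
      | nil =>
        cases ps with
        | nil => simp
        | cons q ps' =>
          exact ⟨'_' :: PySem.Chars.join ['_'] (q :: ps'),
            by simp [pvJ, PySem.Chars.join_singleton, PySem.Chars.join_cons_cons]⟩
      | cons r rs =>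
        have hpsne : ps ≠ [] := by rintro rfl; simp at he'
        obtain ⟨q, ps', rfl⟩ := List.exists_cons_of_ne_nil hpsne
        have h1 := ih e'
        rw [he'] at h1
        obtain ⟨t, ht⟩ := h1
        refine ⟨t, ?_⟩
        rw [show pvJ (p :: r :: rs) = p ++ '_' :: pvJ (r :: rs) by
              simp [pvJ, PySem.Chars.join_cons_cons],
            show pvJ (p :: q :: ps') = p ++ '_' :: pvJ (q :: ps') by
              simp [pvJ, PySem.Chars.join_cons_cons],
            ← ht]
        simp

lemma pvJ_take_sep_prefix (ps : List (List Char)) (e : Nat) (h1 : 1 ≤ e) (h2 : e < ps.length) :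
    pvJ (ps.take e) ++ ['_'] <+: pvJ ps := by
  have hstep := pvJ_take_succ ps e h1 h2
  have hpre := pvJ_take_prefix ps (e+1)
  rw [hstep] at hpre
  exact List.IsPrefix.trans ⟨ps[e], by simp⟩ hpre

lemma pvJ_len_mono (ps : List (List Char)) (e e' : Nat) (h1 : 1 ≤ e) (h2 : e ≤ e') (h3 : e' ≤ ps.length) :
    (pvJ (ps.take e)).length ≤ (pvJ (ps.take e')).length := by
  induction e' with
  | zero => omega
  | succ k ih =>
    rcases Nat.lt_or_ge e (k+1) with h | h
    · have hk : k < ps.length := by omega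
      have := pvJ_take_succ ps k (by omega) hk
      have hle := ih (by omega) (by omega)
      rw [this]
      simp
      omega
    · have : e = k + 1 := by omega
      subst this
      exact le_refl _


lemma pvConv : ∀ (ps : List (List Char)), (∀ p ∈ ps, '_' ∉ p) → ∀ k, k ++ ['_'] <+: pvJ ps →
    ∃ e : Nat, 1 ≤ e ∧ e < ps.length ∧ k = pvJ (ps.take e) := by
  intro ps
  induction ps with
  | nil =>
    intro _ k h
    simp [pvJ, PySem.Chars.join_nil] at h
  | cons p ps ih =>
    intro hs k h
    cases ps with
    | nil =>
      rw [show pvJ [p] = p by simp [pvJ, PySem.Chars.join_singleton]] at h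
      exact absurd (h.subset (by simp)) (hs p (by simp))
    | cons q rest =>
      have hwhole : pvJ (p :: q :: rest) = p ++ '_' :: pvJ (q :: rest) := by
        simp [pvJ, PySem.Chars.join_cons_cons]
      rw [hwhole] at h
      rcases Nat.lt_trichotomy k.length p.length with hlt | heq | hgt
      · have hp : p <+: p ++ '_' :: pvJ (q :: rest) := ⟨'_' :: pvJ (q :: rest), rfl⟩
        have : k ++ ['_'] <+: p := List.prefix_of_prefix_length_le h hp (by simp; omega)
        exact absurd (this.subset (by simp)) (hs p (by simp))
      · have hk : k <+: p ++ '_' :: pvJ (q :: rest) :=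
          List.IsPrefix.trans ⟨['_'], rfl⟩ h
        have hp : p <+: p ++ '_' :: pvJ (q :: rest) := ⟨'_' :: pvJ (q :: rest), rfl⟩
        have : k = p :=
          List.IsPrefix.eq_of_length (List.prefix_of_prefix_length_le hk hp (by omega)) heq
        exact ⟨1, by omega, by simp, by simp [pvJ, PySem.Chars.join_singleton, this]⟩
      · have hk : k <+: p ++ '_' :: pvJ (q :: rest) :=
          List.IsPrefix.trans ⟨['_'], rfl⟩ h
        have hpu : p ++ ['_'] <+: p ++ '_' :: pvJ (q :: rest) := ⟨pvJ (q :: rest), by simp⟩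
        have hpk : p ++ ['_'] <+: k :=
          List.prefix_of_prefix_length_le hpu hk (by simp; omega)
        obtain ⟨k', rfl⟩ := hpk
        have h' : k' ++ ['_'] <+: pvJ (q :: rest) := by
          have : (p ++ ['_']) ++ (k' ++ ['_']) <+: (p ++ ['_']) ++ pvJ (q :: rest) := by
            simpa using h
          exact (List.prefix_append_right_inj (p ++ ['_'])).mp this
        obtain ⟨e', he1, he2, he3⟩ := ih (fun x hx => hs x (by simp [hx])) k' h'
        refine ⟨e' + 1, by omega, by simp at he2 ⊢; omega, ?_⟩
        obtain ⟨r, rs, hr⟩ := List.exists_cons_of_ne_nil (show (q :: rest).take e' ≠ [] by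
          intro hh
          rcases List.take_eq_nil_iff.mp hh with hh' | hh'
          · omega
          · simp at hh')
        rw [List.take_succ_cons, show pvJ (p :: (q :: rest).take e')
              = p ++ '_' :: pvJ ((q :: rest).take e') by
            rw [hr]; simp [pvJ, PySem.Chars.join_cons_cons], ← he3]
        simp

lemma pvG_prefix (s k : String) (h : pvG s k = true) : k.toList <+: s.toList := by
  unfold pvG at h
  rcases Bool.or_eq_true_iff.mp h with h | h
  · rw [show k = s from beq_iff_eq.mp h]
  · rw [PySem.Str.startswith_eq] at h
    have := (PySem.Chars.startswith_iff _ _).mp h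
    rw [String.toList_append, show ("_" : String).toList = ['_'] from rfl] at this
    exact List.IsPrefix.trans ⟨['_'], rfl⟩ this

lemma pvG_unique (s k1 k2 : String) (h1 : pvG s k1 = true) (h2 : pvG s k2 = true)
    (hl : k1.toList.length = k2.toList.length) : k1 = k2 := by
  have p1 := pvG_prefix s k1 h1
  have p2 := pvG_prefix s k2 h2
  exact String.toList_inj.mp
    (List.IsPrefix.eq_of_length (List.prefix_of_prefix_length_le p1 p2 (by omega)) hl)

lemma pvLoopA_spec (tol : List (String × Int)) (parts : List String) :
    ∀ (es : List Int), es.Pairwise (· > ·) →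
    ((pvLoopA tol parts es = none → ∀ e ∈ es,
        pvKey tol (PySem.Str.join "_" (PySem.List.slice parts none (some e))) = false)
     ∧ (∀ k, pvLoopA tol parts es = some k → ∃ e ∈ es,
        k = PySem.Str.join "_" (PySem.List.slice parts none (some e))
        ∧ pvKey tol k = true
        ∧ ∀ e' ∈ es, e < e' →
            pvKey tol (PySem.Str.join "_" (PySem.List.slice parts none (some e'))) = false)) := by
  intro es
  induction es with
  | nil => intro _; exact ⟨by simp, by simp [pvLoopA]⟩
  | cons e es ih =>
    intro hpw
    have hpw' := (List.pairwise_cons.mp hpw).2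
    have hgt := (List.pairwise_cons.mp hpw).1
    obtain ⟨ihn, ihs⟩ := ih hpw'
    by_cases hk : tol.any (fun p =>
        p.1 == PySem.Str.join "_" (PySem.List.slice parts none (some e))) = true
    · constructor
      · intro h
        rw [show pvLoopA tol parts (e :: es)
            = some (PySem.Str.join "_" (PySem.List.slice parts none (some e))) by
          simp [pvLoopA, hk]] at h
        cases h
      · intro k hkk
        rw [show pvLoopA tol parts (e :: es)
            = some (PySem.Str.join "_" (PySem.List.slice parts none (some e))) by
          simp [pvLoopA, hk]] at hkk
        cases hkk
        refine ⟨e, by simp, rfl, hk, ?_⟩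
        intro e' he' hlt
        rcases List.mem_cons.mp he' with rfl | he''
        · omega
        · exact absurd hlt (by have := hgt e' he''; omega)
    · have hkF : pvKey tol (PySem.Str.join "_" (PySem.List.slice parts none (some e))) = false :=
        Bool.eq_false_iff.mpr (fun hh => hk hh)
      have hred : pvLoopA tol parts (e :: es) = pvLoopA tol parts es := by
        rw [show pvLoopA tol parts (e :: es)
            = if tol.any (fun p => p.1 == PySem.Str.join "_" (PySem.List.slice parts none (some e)))
              then some (PySem.Str.join "_" (PySem.List.slice parts none (some e)))
              else pvLoopA tol parts es from rfl, if_neg hk]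
      rw [hred]
      constructor
      · intro h
        intro e' he'
        rcases List.mem_cons.mp he' with rfl | he''
        · exact hkF
        · exact ihn h e' he''
      · intro k hkk
        obtain ⟨e0, he0, hke, hkey, hmax⟩ := ihs k hkk
        refine ⟨e0, by simp [he0], hke, hkey, ?_⟩
        intro e' he' hlt
        rcases List.mem_cons.mp he' with rfl | he''
        · exact hkF
        · exact hmax e' he'' hlt

lemma pvFoldB_spec (s : String) : ∀ (tol : List (String × Int)) (acc : Option String),
    (∀ a, acc = some a → pvG s a = true) →
    (tol.foldl (fun best p =>
      if p.1 == s || PySem.Str.startswith s (p.1 ++ "_") then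
        match best with
        | none => some p.1
        | some b => if PySem.Str.len b < PySem.Str.len p.1 then some p.1 else some b
      else best) acc = none → acc = none ∧ ∀ p ∈ tol, pvG s p.1 = false)
    ∧ (∀ b, tol.foldl (fun best p =>
      if p.1 == s || PySem.Str.startswith s (p.1 ++ "_") then
        match best with
        | none => some p.1
        | some b => if PySem.Str.len b < PySem.Str.len p.1 then some p.1 else some b
      else best) acc = some b → pvG s b = true
        ∧ ((∃ p ∈ tol, p.1 = b) ∨ acc = some b)
        ∧ (∀ p ∈ tol, pvG s p.1 = true → p.1.toList.length ≤ b.toList.length)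
        ∧ (∀ a, acc = some a → a.toList.length ≤ b.toList.length)) := by
  intro tol
  induction tol with
  | nil =>
    intro acc hacc
    refine ⟨fun h => ⟨h, by simp⟩, fun b hb => ?_⟩
    simp only [List.foldl_nil] at hb
    exact ⟨hacc b hb, Or.inr hb, by simp,
      fun a ha => by rw [hb] at ha; cases ha; exact le_refl _⟩
  | cons p tol ih =>
    intro acc hacc
    simp only [List.foldl_cons]
    by_cases hg : (p.1 == s || PySem.Str.startswith s (p.1 ++ "_")) = true
    · have hgG : pvG s p.1 = true := hg
      cases acc with
      | none =>
        simp only [hg, if_true]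
        have hstep := ih (some p.1) (by intro a ha; cases ha; exact hgG)
        refine ⟨fun h => absurd (hstep.1 h).1 (by simp), fun b hb => ?_⟩
        obtain ⟨hGb, hmem, htail, haccb⟩ := hstep.2 b hb
        refine ⟨hGb, ?_, ?_, by simp⟩
        · rcases hmem with ⟨q, hq, hq1⟩ | heq
          · exact Or.inl ⟨q, by simp [hq], hq1⟩
          · exact Or.inl ⟨p, by simp, by injection heq⟩
        · intro q hq hGq
          rcases List.mem_cons.mp hq with rfl | hq'
          · exact haccb _ rfl
          · exact htail q hq' hGq
      | some a =>
        have hGa : pvG s a = true := hacc a rfl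
        simp only [hg, if_true]
        by_cases hlt : PySem.Str.len a < PySem.Str.len p.1
        · rw [if_pos hlt]
          have hlen : a.toList.length < p.1.toList.length := by
            simpa [PySem.Str.len_eq] using hlt
          have hstep := ih (some p.1) (by intro x hx; cases hx; exact hgG)
          refine ⟨fun h => absurd (hstep.1 h).1 (by simp), fun b hb => ?_⟩
          obtain ⟨hGb, hmem, htail, haccb⟩ := hstep.2 b hb
          refine ⟨hGb, ?_, ?_, ?_⟩
          · rcases hmem with ⟨q, hq, hq1⟩ | heq
            · exact Or.inl ⟨q, by simp [hq], hq1⟩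
            · exact Or.inl ⟨p, by simp, by injection heq⟩
          · intro q hq hGq
            rcases List.mem_cons.mp hq with rfl | hq'
            · exact haccb _ rfl
            · exact htail q hq' hGq
          · intro x hx; cases hx
            exact le_trans (le_of_lt hlen) (haccb _ rfl)
        · rw [if_neg hlt]
          have hlen : p.1.toList.length ≤ a.toList.length := by
            simp [PySem.Str.len_eq] at hlt
            exact_mod_cast hlt
          have hstep := ih (some a) (by intro x hx; cases hx; exact hGa)
          refine ⟨fun h => absurd (hstep.1 h).1 (by simp), fun b hb => ?_⟩
          obtain ⟨hGb, hmem, htail, haccb⟩ := hstep.2 b hb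
          refine ⟨hGb, ?_, ?_, ?_⟩
          · rcases hmem with ⟨q, hq, hq1⟩ | heq
            · exact Or.inl ⟨q, by simp [hq], hq1⟩
            · exact Or.inr heq
          · intro q hq hGq
            rcases List.mem_cons.mp hq with rfl | hq'
            · exact le_trans hlen (haccb _ rfl)
            · exact htail q hq' hGq
          · intro x hx; cases hx; exact haccb _ rfl
    · have hgF : pvG s p.1 = false := Bool.eq_false_iff.mpr (fun hh => hg hh)
      simp only [Bool.not_eq_true] at hg
      simp only [hg, Bool.false_eq_true, if_false]
      have hstep := ih acc hacc
      refine ⟨fun h => ⟨(hstep.1 h).1, ?_⟩, fun b hb => ?_⟩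
      · intro q hq
        rcases List.mem_cons.mp hq with rfl | hq'
        · exact hgF
        · exact (hstep.1 h).2 q hq'
      · obtain ⟨hGb, hmem, htail, haccb⟩ := hstep.2 b hb
        refine ⟨hGb, ?_, ?_, haccb⟩
        · rcases hmem with ⟨q, hq, hq1⟩ | heq
          · exact Or.inl ⟨q, by simp [hq], hq1⟩
          · exact Or.inr heq
        · intro q hq hGq
          rcases List.mem_cons.mp hq with rfl | hq'
          · rw [show pvG s q.1 = (q.1 == s || PySem.Str.startswith s (q.1 ++ "_")) from rfl] at hGq
            rw [hg] at hGq; cases hGq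
          · exact htail q hq' hGq


lemma pvMain (s : String) (tol : List (String × Int)) :
    resolve_tolerance_key_py s tol = resolve_tolerance_key_py_alt s tol := by
  have hfold := pvFoldB_spec s tol none (by simp)
  set cs := s.toList with hcs
  set psL := List.splitOn '_' cs with hpsL
  have hsplit : PySem.Str.split? s "_" = some (psL.map (fun l => String.ofList l)) := by
    rw [show PySem.Str.split? s "_"
        = Option.map (fun x => List.map String.ofList x) (PySem.Chars.split? s.toList "_".toList)
        from rfl]
    rw [show ("_" : String).toList = ['_'] from rfl]
    rw [show PySem.Chars.split? s.toList ['_'] = some (PySem.Chars.splitOn s.toList ['_']) by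
      simp [PySem.Chars.split?]]
    rw [pvSplitOn_eq]
    rfl
  set parts : List String := psL.map (fun l => String.ofList l) with hpartsdef
  have hptl : parts.map String.toList = psL := by
    rw [hpartsdef, List.map_map]
    have : (String.toList ∘ fun l => String.ofList l) = id := by
      funext l; simp
    rw [this, List.map_id]
  have hplen : parts.length = psL.length := by rw [hpartsdef, List.length_map]
  have hnosep := pvSplitOn_no_sep cs
  have hJ : pvJ psL = cs := pvJ_splitOn cs
  have hcand : ∀ e : Int, 0 ≤ e →
      (PySem.Str.join "_" (PySem.List.slice parts none (some e))).toList
        = pvJ (psL.take e.toNat) := by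
    intro e he
    rw [PySem.List.slice_to parts he, PySem.Str.toList_join,
      show ("_" : String).toList = ['_'] from rfl]
    have hmt : (List.take e.toNat parts).map String.toList = psL.take e.toNat := by
      rw [← hptl, List.map_take]
    rw [hmt]; rfl
  -- a candidate with 1 ≤ e < psL.length satisfies pvG
  have hcandG : ∀ e : Int, 1 ≤ e → e.toNat < psL.length →
      pvG s (PySem.Str.join "_" (PySem.List.slice parts none (some e))) = true := by
    intro e h1 h2
    unfold pvG
    apply Bool.or_eq_true_iff.mpr
    right
    rw [PySem.Str.startswith_eq]
    apply (PySem.Chars.startswith_iff _ _).mpr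
    rw [String.toList_append, show ("_" : String).toList = ['_'] from rfl,
      hcand e (by omega), ← hcs, ← hJ]
    exact pvJ_take_sep_prefix psL e.toNat (by omega) h2
  -- pvKey unfolding
  have hkey_mem : ∀ k, pvKey tol k = true ↔ ∃ p ∈ tol, p.1 = k := by
    intro k
    unfold pvKey
    rw [List.any_eq_true]
    constructor
    · rintro ⟨p, hp, hpk⟩; exact ⟨p, hp, beq_iff_eq.mp hpk⟩
    · rintro ⟨p, hp, hpk⟩; exact ⟨p, hp, beq_iff_eq.mpr hpk⟩
  by_cases hhead : tol.any (fun p => p.1 == s) = true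
  · -- A returns source_key itself
    rw [show resolve_tolerance_key_py s tol = some s by
      unfold resolve_tolerance_key_py; rw [if_pos hhead]]
    obtain ⟨p, hp, hps⟩ := (hkey_mem s).mp hhead
    have hGs : pvG s s = true := by unfold pvG; simp
    cases hB : resolve_tolerance_key_py_alt s tol with
    | none =>
      have := (hfold.1 hB).2 p hp
      rw [hps] at this
      rw [this] at hGs
      cases hGs
    | some b =>
      obtain ⟨hGb, _, htail, _⟩ := hfold.2 b hB
      have h1 : s.toList.length ≤ b.toList.length := by
        have := htail p hp (by rw [hps]; exact hGs)
        rw [hps] at this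
        exact this
      have h2 : b.toList.length ≤ s.toList.length := (pvG_prefix s b hGb).length_le
      rw [pvG_unique s b s hGb hGs (by omega)]
  · -- A falls through to the prefix loop
    have hheadF : tol.any (fun p => p.1 == s) = false := Bool.eq_false_iff.mpr hhead
    rw [show resolve_tolerance_key_py s tol
        = pvLoopA tol parts (PySem.List.pyRange ((parts.length : Int) - 1) 0 (-1)) by
      unfold resolve_tolerance_key_py
      rw [if_neg hhead, hsplit]]
    set es := PySem.List.pyRange ((parts.length : Int) - 1) 0 (-1) with hes
    have hpw : es.Pairwise (· > ·) := by
      rw [hes, PySem.List.pyRange_neg_one_eq_reverse, List.pairwise_reverse]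
      exact PySem.List.pairwise_lt_pyRange_one _ _
    obtain ⟨hln, hls⟩ := pvLoopA_spec tol parts es hpw
    have hmem_es : ∀ x : Int, x ∈ es ↔ 0 < x ∧ x ≤ (parts.length : Int) - 1 := by
      intro x
      rw [hes]
      exact PySem.List.mem_pyRange_neg_one
    have hsnk : ∀ p ∈ tol, p.1 ≠ s := by
      intro p hp hpe
      have : tol.any (fun p => p.1 == s) = true := (hkey_mem s).mpr ⟨p, hp, hpe⟩
      rw [hheadF] at this; cases this
    cases hA : pvLoopA tol parts es with
    | some k =>
      obtain ⟨e, hei, hke, hkkey, hmax⟩ := hls k hA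
      obtain ⟨he1, he2⟩ := (hmem_es e).mp hei
      have hetn : e.toNat < psL.length := by omega
      have hGk : pvG s k = true := by rw [hke]; exact hcandG e (by omega) hetn
      obtain ⟨pk, hpk, hpk1⟩ := (hkey_mem k).mp hkkey
      cases hB : resolve_tolerance_key_py_alt s tol with
      | none =>
        have := (hfold.1 hB).2 pk hpk
        rw [hpk1, hGk] at this
        cases this
      | some b =>
        obtain ⟨hGb, hmemb, htail, _⟩ := hfold.2 b hB
        have hbkeys : ∃ p ∈ tol, p.1 = b := by
          rcases hmemb with h | h
          · exact h
          · cases h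
        -- show b.toList.length ≤ k.toList.length
        have hble : b.toList.length ≤ k.toList.length := by
          rcases Bool.or_eq_true_iff.mp (show (b == s || PySem.Str.startswith s (b ++ "_")) = true from hGk ▸ hGb) with hb1 | hb2
          · -- b = s : impossible, s is not a key
            obtain ⟨pb, hpb, hpb1⟩ := hbkeys
            exact absurd (hpb1.trans (beq_iff_eq.mp hb1)) (hsnk pb hpb)
          · -- b is a proper anchored prefix: b = candidate e' with e' ≤ e
            rw [PySem.Str.startswith_eq] at hb2
            have hb2' := (PySem.Chars.startswith_iff _ _).mp hb2
            rw [String.toList_append, show ("_" : String).toList = ['_'] from rfl, ← hcs, ← hJ] at hb2'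
            obtain ⟨e', he'1, he'2, he'3⟩ := pvConv psL hnosep b.toList hb2'
            have hmemes : ((e' : Int)) ∈ es := (hmem_es _).mpr (by omega)
            have hbeq : b = PySem.Str.join "_" (PySem.List.slice parts none (some (e' : Int))) := by
              apply String.toList_inj.mp
              rw [hcand (e' : Int) (by positivity), Int.toNat_natCast, he'3]
            have hkey' : pvKey tol (PySem.Str.join "_" (PySem.List.slice parts none (some (e' : Int)))) = true := by
              rw [← hbeq]
              exact (hkey_mem b).mpr hbkeys
            have hle : (e' : Int) ≤ e := by
              by_contra hcon
              rw [not_le] at hcon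
              rw [hmax (e' : Int) hmemes hcon] at hkey'
              cases hkey'
            rw [he'3, hke, hcand e (by omega)]
            exact pvJ_len_mono psL e' e.toNat he'1 (by omega) (by omega)
        have hkle := htail pk hpk (by rw [hpk1]; exact hGk)
        rw [hpk1] at hkle
        rw [pvG_unique s b k hGb hGk (by omega)]
    | none =>
      cases hB : resolve_tolerance_key_py_alt s tol with
      | none => rfl
      | some b =>
        exfalso
        obtain ⟨hGb, hmemb, _, _⟩ := hfold.2 b hB
        have hbkeys : ∃ p ∈ tol, p.1 = b := by
          rcases hmemb with h | h
          · exact h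
          · cases h
        rcases Bool.or_eq_true_iff.mp (show (b == s || PySem.Str.startswith s (b ++ "_")) = true from hGb) with hb1 | hb2
        · obtain ⟨pb, hpb, hpb1⟩ := hbkeys
          exact absurd (hpb1.trans (beq_iff_eq.mp hb1)) (hsnk pb hpb)
        · rw [PySem.Str.startswith_eq] at hb2
          have hb2' := (PySem.Chars.startswith_iff _ _).mp hb2
          rw [String.toList_append, show ("_" : String).toList = ['_'] from rfl, ← hcs, ← hJ] at hb2'
          obtain ⟨e', he'1, he'2, he'3⟩ := pvConv psL hnosep b.toList hb2'
          have hmemes : ((e' : Int)) ∈ es := (hmem_es _).mpr (by omega)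
          have hbeq : b = PySem.Str.join "_" (PySem.List.slice parts none (some (e' : Int))) := by
            apply String.toList_inj.mp
            rw [hcand (e' : Int) (by positivity), Int.toNat_natCast, he'3]
          have := hln hA (e' : Int) hmemes
          rw [← hbeq] at this
          rw [(hkey_mem b).mpr hbkeys] at this
          cases this

-- ===== VERDICT (by name: the statement is the Claim_ definition above) =====
theorem resolve_tolerance_key_py_spec : Claim_equal_resolve_tolerance_key_py := by
  intro source_key tolerances _
  unfold Spec_resolve_tolerance_key_py
  exact pvMain source_key tolerances
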